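-- pv_equiv track=rewrite | github.com/RomuloAS/palindrome | palindrome.py | hyphenated
-- ===== SOURCE A (Python) =====
-- def hyphenated(word):
--     """Remove special characters(non alphanumeric) from the string
--
--     This function remove all non alphanumeric characters from the string,
--     and it test if it is a hyphenated word.
--
--     Parameters
--     -------------
--     word : string
--         First argument
--
--     Returns
--     -------------
--     string
--         Returns word_corrected
--     """
--
--     found = False # True when find a non alphanumeric
--     word_corrected = ""
--     first = True # check symbols in the first position
--     for letter in word:
--         if letter.isalnum():
--             word_corrected += letter
--             found = False
--             first = False
--         else:
--             if found:
--                 return word_corrected[:-1]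
--             if first:
--                 continue
--             word_corrected += letter
--             found = True
--             first = False
--     else:
--         if found:
--             return word_corrected[:-1]
--
--     return word_corrected
-- ===== SOURCE B (Python) =====
-- def hyphenated(word):
--     """Remove special characters(non alphanumeric) from the string (break-point-then-trim)."""
--     i = 0
--     while i < len(word) and not word[i].isalnum():
--         i += 1
--     rem = word[i:]
--     for j in range(len(rem) - 1):
--         if not rem[j].isalnum() and not rem[j + 1].isalnum():
--             return rem[:j]
--     if rem and not rem[-1].isalnum():
--         return rem[:-1]
--     return rem
-- ===== Notes on version B (the rewrite author's own statement) =====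
-- stated objective: simpler
-- what changed: Replaced A's single flag-driven pass with mutable found/first state by a three-step decomposition: drop leading non-alphanumerics, return the prefix before the first consecutive non-alphanumeric pair if one exists, otherwise trim at most one trailing non-alphanumeric.
import Mathlib
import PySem

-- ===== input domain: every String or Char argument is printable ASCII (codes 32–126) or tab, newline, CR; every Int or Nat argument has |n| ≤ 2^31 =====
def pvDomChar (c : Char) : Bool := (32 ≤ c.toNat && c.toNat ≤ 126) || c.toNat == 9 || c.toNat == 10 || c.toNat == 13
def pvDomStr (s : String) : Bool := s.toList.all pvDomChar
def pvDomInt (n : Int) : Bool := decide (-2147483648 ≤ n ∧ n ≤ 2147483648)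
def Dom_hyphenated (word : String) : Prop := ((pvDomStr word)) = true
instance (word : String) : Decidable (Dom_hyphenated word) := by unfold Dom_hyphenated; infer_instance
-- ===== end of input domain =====

-- B replaces A's flag-driven single pass (found/first) with a skip-leading-separators,
-- find-the-break-point, trim-one-trailing-separator decomposition (objective: simpler).

-- ===== PORT A =====
-- A's loop: state (found, word_corrected, first); early return = the recursion stops and yields.
def hyphenatedLoopA : List Char → Bool → List Char → Bool → List Char
  | [], found, wc, _ => if found then wc.dropLast else wc
  | c :: rest, found, wc, first =>
    if PySem.Chars.isalnum c then
      hyphenatedLoopA rest false (wc ++ [c]) false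
    else if found then wc.dropLast
    else if first then hyphenatedLoopA rest found wc first
    else hyphenatedLoopA rest true (wc ++ [c]) false

def hyphenated (word : String) : String :=
  String.mk (hyphenatedLoopA word.toList false [] true)

-- ===== PORT B =====
-- scan for the first consecutive pair of non-alphanumerics; `some p` = prefix before the pair
def hyphenatedScanPair : List Char → Option (List Char)
  | c1 :: c2 :: rest =>
    if ¬ PySem.Chars.isalnum c1 ∧ ¬ PySem.Chars.isalnum c2 then some []
    else (hyphenatedScanPair (c2 :: rest)).map (c1 :: ·)
  | _ => none

def hyphenated_alt (word : String) : String :=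
  let rem := word.toList.dropWhile (fun c => ! PySem.Chars.isalnum c)
  match hyphenatedScanPair rem with
  | some p => String.mk p
  | none =>
    match rem.getLast? with
    | some c => if ¬ PySem.Chars.isalnum c then String.mk rem.dropLast else String.mk rem
    | none => String.mk rem

-- ===== PRECONDITION & SPEC =====
def Spec_hyphenated (word : String) (out : String) : Prop := out = hyphenated_alt word
instance (word : String) (out : String) : Decidable (Spec_hyphenated word out) := by unfold Spec_hyphenated; infer_instance

-- ===== CLAIM (what is proved, stated in full; the proofs are below) =====
def Claim_equal_hyphenated : Prop := ∀ (word : String), Dom_hyphenated word → Spec_hyphenated word (hyphenated word)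

-- ===== LEMMAS AND PROOFS =====

-- B's core on a list with the skipping already done
def hyphenatedFB (l : List Char) : List Char :=
  match hyphenatedScanPair l with
  | some p => p
  | none =>
    match l.getLast? with
    | some c => if ¬ PySem.Chars.isalnum c then l.dropLast else l
    | none => l

theorem hyphenatedLoopA_main : ∀ (l wc : List Char),
    hyphenatedLoopA l false wc false = wc ++ hyphenatedFB l := by
  intro l
  induction hn : l.length using Nat.strong_induction_on generalizing l with
  | _ n ih =>
    match l, hn with
    | [], hn => intro wc; simp [hyphenatedLoopA, hyphenatedFB, hyphenatedScanPair]
    | [c], hn =>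
      intro wc
      by_cases h : PySem.Chars.isalnum c = true
      · simp [hyphenatedLoopA, hyphenatedFB, hyphenatedScanPair, h]
      · simp [hyphenatedLoopA, hyphenatedFB, hyphenatedScanPair, h]
    | c1 :: c2 :: rest, hn =>
      intro wc
      by_cases h1 : PySem.Chars.isalnum c1 = true
      · -- A appends c1 and recurses in found=false
        have := ih (c2 :: rest).length (by subst hn; simp) (c2 :: rest) rfl (wc ++ [c1])
        rw [show hyphenatedLoopA (c1 :: c2 :: rest) false wc false
              = hyphenatedLoopA (c2 :: rest) false (wc ++ [c1]) false by
            simp [hyphenatedLoopA, h1], this]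
        -- fB (c1 :: t) = c1 :: fB t when c1 alnum
        have hfb : hyphenatedFB (c1 :: c2 :: rest) = c1 :: hyphenatedFB (c2 :: rest) := by
          unfold hyphenatedFB
          simp only [hyphenatedScanPair, h1]
          cases hs : hyphenatedScanPair (c2 :: rest) with
          | some p => simp [hs, h1]
          | none =>
            simp [hs, h1]
            cases hl : (c2 :: rest).getLast? with
            | none => simp at hl
            | some c =>
              have : (c1 :: c2 :: rest).getLast? = some c := by
                rw [List.getLast?_cons_cons, hl]
              simp [hl, this]
              by_cases hc : PySem.Chars.isalnum c = true <;>
                simp [hc, List.dropLast_cons_of_ne_nil (l := c2 :: rest) (by simp)]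
        rw [hfb]; simp
      · by_cases h2 : PySem.Chars.isalnum c2 = true
        · -- c1 sep, c2 alnum: A appends c1 (found=true), then c2 (found=false)
          have := ih rest.length (by subst hn; simp) rest rfl (wc ++ [c1, c2])
          have hstep : hyphenatedLoopA (c1 :: c2 :: rest) false wc false
              = hyphenatedLoopA rest false (wc ++ [c1, c2]) false := by
            simp [hyphenatedLoopA, h1, h2]
          rw [hstep, this]
          have hfb : hyphenatedFB (c1 :: c2 :: rest) = c1 :: c2 :: hyphenatedFB rest := by
            unfold hyphenatedFB
            simp only [hyphenatedScanPair, h1, h2]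
            cases hs : hyphenatedScanPair rest with
            | some p =>
              cases rest with
              | nil => simp [hyphenatedScanPair] at hs
              | cons c3 r3 => simp [hyphenatedScanPair, h2, hs]
            | none =>
              cases rest with
              | nil => simp [hyphenatedScanPair, h2, hs, List.getLast?, h1]
              | cons c3 r3 =>
                simp [hyphenatedScanPair, h2, hs]
                cases hl : (c3 :: r3).getLast? with
                | none => simp at hl
                | some c =>
                  have h4 : (c2 :: c3 :: r3).getLast? = some c := by
                    rw [List.getLast?_cons_cons, hl]
                  have h5 : (c1 :: c2 :: c3 :: r3).getLast? = some c := by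
                    rw [List.getLast?_cons_cons, h4]
                  simp [hl, h5]
                  by_cases hc : PySem.Chars.isalnum c = true <;>
                    simp [hc, List.dropLast_cons_of_ne_nil (l := c2 :: c3 :: r3) (by simp),
                          List.dropLast_cons_of_ne_nil (l := c3 :: r3) (by simp)]
          rw [hfb]; simp
        · -- two consecutive separators: A returns (wc ++ [c1]).dropLast = wc
          have hfb : hyphenatedFB (c1 :: c2 :: rest) = [] := by
            unfold hyphenatedFB; simp [hyphenatedScanPair, h1, h2]
          rw [hfb]
          simp [hyphenatedLoopA, h1, h2]

theorem hyphenatedLoopA_skip : ∀ (l : List Char),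
    hyphenatedLoopA l false [] true
      = hyphenatedFB (l.dropWhile (fun c => ! PySem.Chars.isalnum c)) := by
  intro l
  induction l with
  | nil => simp [hyphenatedLoopA, hyphenatedFB, hyphenatedScanPair]
  | cons c rest ih =>
    by_cases h : PySem.Chars.isalnum c = true
    · have : hyphenatedLoopA (c :: rest) false [] true
          = hyphenatedLoopA rest false [c] false := by simp [hyphenatedLoopA, h]
      rw [this, hyphenatedLoopA_main rest [c]]
      -- dropWhile keeps c :: rest
      have hd : (c :: rest).dropWhile (fun c => ! PySem.Chars.isalnum c) = c :: rest := by
        simp [List.dropWhile_cons, h]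
      rw [hd]
      -- fB (c :: rest) = c :: fB rest since c alnum (same fact as in main lemma; reprove case-wise)
      have hfb : hyphenatedFB (c :: rest) = c :: hyphenatedFB rest := by
        unfold hyphenatedFB
        cases rest with
        | nil => simp [hyphenatedScanPair, List.getLast?, h]
        | cons c2 r2 =>
          simp only [hyphenatedScanPair, h]
          simp
          cases hs : hyphenatedScanPair (c2 :: r2) with
          | some p => simp [hs]
          | none =>
            simp [hs]
            cases hl : (c2 :: r2).getLast? with
            | none => simp at hl
            | some cl =>
              have : (c :: c2 :: r2).getLast? = some cl := by
                rw [List.getLast?_cons_cons, hl]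
              simp [hl, this]
              by_cases hc : PySem.Chars.isalnum cl = true <;>
                simp [hc, List.dropLast_cons_of_ne_nil (l := c2 :: r2) (by simp)]
      rw [hfb]; simp
    · have : hyphenatedLoopA (c :: rest) false [] true
          = hyphenatedLoopA rest false [] true := by simp [hyphenatedLoopA, h]
      rw [this, ih]
      simp [List.dropWhile_cons, h]

-- ===== VERDICT (by name: the statement is the Claim_ definition above) =====
theorem hyphenated_spec : Claim_equal_hyphenated := by
  intro word _
  unfold Spec_hyphenated hyphenated hyphenated_alt
  rw [hyphenatedLoopA_skip]
  unfold hyphenatedFB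
  cases hs : hyphenatedScanPair (word.toList.dropWhile (fun c => ! PySem.Chars.isalnum c)) with
  | some p => simp [hs]
  | none =>
    simp only [hs]
    cases hl : (word.toList.dropWhile (fun c => ! PySem.Chars.isalnum c)).getLast? with
    | none => simp
    | some c => by_cases hc : PySem.Chars.isalnum c = true <;> simp [hc]
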